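-- pv_equiv track=rewrite | github.com/kserm/yapr_algorithms_3 | 16_partial_sort.py | get_segments_num
-- ===== SOURCE A (Python) =====
-- def get_segments_num(arr: list, bn=0):
--     b_min = min(arr)
--     start = 0
--     stop = len(arr)
--     for i in range(start, stop):
--         if arr.index(b_min) == stop-1:
--             bn += 1
--             return bn
--         else:
--             if i < stop - 1:
--                 left_max = max(arr[start:i+1])
--                 right_min = min(arr[i+1:stop])
--                 if right_min > left_max:
--                     bn += 1
--                     start = i+1
--                     b_min = right_min
--             else:
--                 bn += 1
--     return bn
-- ===== SOURCE B (Python) =====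
-- def get_segments_num(arr: list, bn=0):
--     # Suffix minima in one backward pass, then a prefix-max sweep
--     # counting the strict cut points; chunks = cuts + 1.
--     suf = list(arr)
--     for i in range(len(arr) - 2, -1, -1):
--         suf[i] = min(suf[i], suf[i + 1])
--     count = 1
--     pmax = arr[0]
--     for a, s in zip(arr, suf[1:]):
--         pmax = max(pmax, a)
--         if s > pmax:
--             count += 1
--     return bn + count
-- ===== Notes on version B (the rewrite author's own statement) =====
-- stated objective: faster
-- what changed: Replaces A's loop that recomputes min/max of slices and re-scans the array with arr.index on every iteration (quadratic) by one backward pass precomputing suffix minima plus one forward prefix-max sweep counting strict cut points, returning bn + cuts + 1.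
import Mathlib
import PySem

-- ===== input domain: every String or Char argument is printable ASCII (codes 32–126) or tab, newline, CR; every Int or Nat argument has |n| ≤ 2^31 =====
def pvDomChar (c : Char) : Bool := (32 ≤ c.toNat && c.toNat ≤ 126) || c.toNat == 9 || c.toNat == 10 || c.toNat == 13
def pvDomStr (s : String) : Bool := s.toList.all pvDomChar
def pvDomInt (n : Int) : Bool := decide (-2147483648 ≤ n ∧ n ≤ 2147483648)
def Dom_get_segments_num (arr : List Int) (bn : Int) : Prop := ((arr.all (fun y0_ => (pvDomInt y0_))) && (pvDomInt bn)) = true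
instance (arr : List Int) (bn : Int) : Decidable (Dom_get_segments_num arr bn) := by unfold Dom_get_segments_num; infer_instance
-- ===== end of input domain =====

-- B replaces A's quadratic slice-rescanning loop by a backward suffix-min pass plus a
-- forward prefix-max sweep counting strict cut points (measured asymptotically faster).

-- ===== PORT A =====
-- the for-loop of A; fuel = number of remaining iterations, i the loop index,
-- (start, bmin, bn) the mutated state
def pvALoop (arr : List Int) : Nat → Nat → Nat → Int → Int → Int
  | 0, _i, _start, _bmin, bn => bn
  | fuel+1, i, start, bmin, bn =>
    if PySem.List.index? arr bmin = some (arr.length - 1) then bn + 1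
    else if i < arr.length - 1 then
      -- slices arr[start:i+1] and arr[i+1:stop] are nonempty here, so max?/min? are `some`
      let left_max := (PySem.List.max? (PySem.List.slice arr (some ((start : Nat) : Int)) (some ((i+1 : Nat) : Int))) (fun x => x)).getD 0
      let right_min := (PySem.List.min? (PySem.List.slice arr (some ((i+1 : Nat) : Int)) (some ((arr.length : Nat) : Int))) (fun x => x)).getD 0
      if left_max < right_min then pvALoop arr fuel (i+1) (i+1) right_min (bn+1)
      else pvALoop arr fuel (i+1) start bmin bn
    else pvALoop arr fuel (i+1) start bmin (bn+1)

def get_segments_num (arr : List Int) (bn : Int) : Int :=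
  -- min(arr) raises on empty arr (excluded by Pre_); the getD default is never used there
  let b_min := (PySem.List.min? arr (fun x => x)).getD 0
  pvALoop arr arr.length 0 0 b_min bn

-- ===== PORT B =====
-- suffix minima of the list (B's backward in-place pass, as a right-to-left recursion)
def pvSufMins : List Int → List Int
  | [] => []
  | x :: rest =>
    match pvSufMins rest with
    | [] => [x]
    | s :: t => min x s :: s :: t

-- B's forward sweep over zip(arr, suf[1:]): running prefix max, count strict cuts
def pvCutLoop : Int → Int → List (Int × Int) → Int
  | count, _pmax, [] => count
  | count, pmax, (a, s) :: rest =>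
    let p := max pmax a
    pvCutLoop (if p < s then count + 1 else count) p rest

def get_segments_num_alt (arr : List Int) (bn : Int) : Int :=
  match arr with
  | [] => 0  -- B raises IndexError on arr[0] here (outside Pre_)
  | a :: _ => bn + pvCutLoop 1 a (arr.zip (pvSufMins arr).tail)

-- ===== PRECONDITION & SPEC =====
-- Pre_ excludes only the empty list, on which A raises ValueError (min of empty sequence).
def Pre_get_segments_num (arr : List Int) (bn : Int) : Prop := arr ≠ []
instance (arr : List Int) (bn : Int) : Decidable (Pre_get_segments_num arr bn) := by unfold Pre_get_segments_num; infer_instance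

def pvWitness_get_segments_num : List Int × Int := ([2, 1, 3], 0)

def Spec_get_segments_num (arr : List Int) (bn : Int) (out : Int) : Prop := out = get_segments_num_alt arr bn
instance (arr : List Int) (bn : Int) (out : Int) : Decidable (Spec_get_segments_num arr bn out) := by unfold Spec_get_segments_num; infer_instance

-- ===== CLAIM (what is proved, stated in full; the proofs are below) =====
def Claim_equal_get_segments_num : Prop := ∀ (arr : List Int) (bn : Int), Dom_get_segments_num arr bn → Pre_get_segments_num arr bn → Spec_get_segments_num arr bn (get_segments_num arr bn)

-- ===== LEMMAS AND PROOFS =====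

-- max/min of a NONEMPTY list (0 is a dummy for []), the common value both programs compute
def nmaxD : List Int → Int
  | [] => 0
  | x :: t => t.foldl max x
def nminD : List Int → Int
  | [] => 0
  | x :: t => t.foldl min x

-- "index j is a cut point": everything up to j is strictly below everything after j
def cutAt (arr : List Int) (j : Nat) : Bool :=
  decide (nmaxD (arr.take (j+1)) < nminD (arr.drop (j+1)))

-- number of cut points at indices ≥ i
def cntFrom (arr : List Int) (i : Nat) : Int :=
  ((List.range' i (arr.length - 1 - i)).countP (cutAt arr) : Nat)

lemma nminD_mem {l : List Int} (h : l ≠ []) : nminD l ∈ l := by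
  cases l with
  | nil => exact absurd rfl h
  | cons x t =>
    simp only [nminD]
    rcases PySem.List.foldl_min_mem t x with h1 | h1
    · rw [h1]; exact List.mem_cons_self
    · exact List.mem_cons_of_mem _ h1

lemma nminD_le {l : List Int} {y : Int} (h : y ∈ l) : nminD l ≤ y := by
  cases l with
  | nil => simp at h
  | cons x t =>
    simp only [nminD]
    rcases List.mem_cons.1 h with rfl | h1
    · exact (PySem.List.foldl_min_le t y).1
    · exact (PySem.List.foldl_min_le t x).2 _ h1

lemma nmaxD_mem {l : List Int} (h : l ≠ []) : nmaxD l ∈ l := by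
  cases l with
  | nil => exact absurd rfl h
  | cons x t =>
    simp only [nmaxD]
    rcases PySem.List.foldl_max_mem t x with h1 | h1
    · rw [h1]; exact List.mem_cons_self
    · exact List.mem_cons_of_mem _ h1

lemma le_nmaxD {l : List Int} {y : Int} (h : y ∈ l) : y ≤ nmaxD l := by
  cases l with
  | nil => simp at h
  | cons x t =>
    simp only [nmaxD]
    rcases List.mem_cons.1 h with rfl | h1
    · exact (PySem.List.le_foldl_max t y).1
    · exact (PySem.List.le_foldl_max t x).2 _ h1

lemma foldl_max_pull (s : List Int) : ∀ a y, s.foldl max (max a y) = max a (s.foldl max y) := by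
  induction s with
  | nil => intro a y; rfl
  | cons z s ih =>
    intro a y
    simp only [List.foldl_cons]
    rw [max_assoc, ih]

lemma foldl_min_pull (s : List Int) : ∀ a y, s.foldl min (min a y) = min a (s.foldl min y) := by
  induction s with
  | nil => intro a y; rfl
  | cons z s ih =>
    intro a y
    simp only [List.foldl_cons]
    rw [min_assoc, ih]

lemma nminD_cons {x : Int} {rest : List Int} (h : rest ≠ []) :
    nminD (x :: rest) = min x (nminD rest) := by
  cases rest with
  | nil => exact absurd rfl h
  | cons y s => simp only [nminD, List.foldl_cons]; exact foldl_min_pull s x y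

lemma nmaxD_append {u v : List Int} (hu : u ≠ []) (hv : v ≠ []) :
    nmaxD (u ++ v) = max (nmaxD u) (nmaxD v) := by
  cases u with
  | nil => exact absurd rfl hu
  | cons x t =>
    cases v with
    | nil => exact absurd rfl hv
    | cons y s =>
      simp only [nmaxD, List.cons_append, List.foldl_append, List.foldl_cons]
      exact foldl_max_pull s _ y

lemma cntFrom_step {arr : List Int} {i : Nat} (h : i < arr.length - 1) :
    cntFrom arr i = (if cutAt arr i then 1 else 0) + cntFrom arr (i+1) := by
  unfold cntFrom
  have h1 : arr.length - 1 - i = (arr.length - 1 - (i+1)) + 1 := by omega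
  rw [h1, List.range'_succ, List.countP_cons]
  by_cases hc : cutAt arr i <;> simp [hc] <;> push_cast <;> ring

lemma cntFrom_last {arr : List Int} {i : Nat} (h : ¬ i < arr.length - 1) :
    cntFrom arr i = 0 := by
  unfold cntFrom
  have h1 : arr.length - 1 - i = 0 := by omega
  simp [h1]

lemma mem_take_of_lt {l : List Int} {m k : Nat} (h : m < l.length) (hmk : m < k) : l[m] ∈ l.take k := by
  have h2 : m < (l.take k).length := by simp [List.length_take]; omega
  refine List.mem_iff_getElem.2 ⟨m, h2, ?_⟩
  exact List.getElem_take

lemma mem_drop_of_le {l : List Int} {m k : Nat} (h : m < l.length) (hkm : k ≤ m) : l[m] ∈ l.drop k := by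
  have h2 : m - k < (l.drop k).length := by simp [List.length_drop]; omega
  refine List.mem_iff_getElem.2 ⟨m - k, h2, ?_⟩
  rw [List.getElem_drop]
  congr 1
  omega

-- A's loop invariant: bmin is the min of arr[start:], everything before start is < bmin;
-- the loop then adds (number of cut points ≥ i) + 1 to bn.
lemma aloop_eq (arr : List Int) :
    ∀ (fuel i start : Nat) (bmin bn : Int), fuel + i = arr.length → start ≤ i → i < arr.length →
    bmin = nminD (arr.drop start) →
    (∀ x ∈ arr.take start, x < bmin) →
    pvALoop arr fuel i start bmin bn = bn + cntFrom arr i + 1 := by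
  intro fuel
  induction fuel with
  | zero => intro i start bmin bn hfi hsi hin _ _; omega
  | succ f ihf =>
    intro i start bmin bn hfi hsi hin hbm hlt
    have hstart_lt : start < arr.length := lt_of_le_of_lt hsi hin
    have hbmin_le : ∀ (m : Nat) (hm : m < arr.length), start ≤ m → bmin ≤ arr[m] := by
      intro m hm hsm
      rw [hbm]; exact nminD_le (mem_drop_of_le hm hsm)
    show (if PySem.List.index? arr bmin = some (arr.length - 1) then bn + 1
      else if i < arr.length - 1 then
        if ((PySem.List.max? (PySem.List.slice arr (some ((start : Nat) : Int)) (some ((i+1 : Nat) : Int))) (fun x => x)).getD 0)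
            < ((PySem.List.min? (PySem.List.slice arr (some ((i+1 : Nat) : Int)) (some ((arr.length : Nat) : Int))) (fun x => x)).getD 0) then
          pvALoop arr f (i+1) (i+1) ((PySem.List.min? (PySem.List.slice arr (some ((i+1 : Nat) : Int)) (some ((arr.length : Nat) : Int))) (fun x => x)).getD 0) (bn+1)
        else pvALoop arr f (i+1) start bmin bn
      else pvALoop arr f (i+1) start bmin (bn+1)) = bn + cntFrom arr i + 1
    by_cases hidx : PySem.List.index? arr bmin = some (arr.length - 1)
    · rw [if_pos hidx]
      obtain ⟨hk, hlast, -⟩ := PySem.List.getElem_of_index?_eq_some hidx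
      have hcnt : cntFrom arr i = 0 := by
        unfold cntFrom
        have hz : (List.range' i (arr.length - 1 - i)).countP (cutAt arr) = 0 := by
          apply List.countP_eq_zero.2
          intro j hj
          have hj' : i ≤ j ∧ j < arr.length - 1 := by
            rw [List.mem_range'_1] at hj; omega
          simp only [cutAt, decide_eq_true_eq, not_lt]
          have h1 : nminD (arr.drop (j+1)) ≤ bmin := by
            rw [← hlast]; exact nminD_le (mem_drop_of_le hk (by omega))
          have h2 : bmin ≤ arr[start] := hbmin_le start hstart_lt le_rfl
          have h3 : arr[start] ≤ nmaxD (arr.take (j+1)) :=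
            le_nmaxD (mem_take_of_lt hstart_lt (by omega))
          linarith
        rw [hz]; rfl
      rw [hcnt]; ring
    · rw [if_neg hidx]
      by_cases hi : i < arr.length - 1
      · rw [if_pos hi]
        have hslice1 : PySem.List.slice arr (some ((start : Nat) : Int)) (some ((i+1 : Nat) : Int))
            = (arr.drop start).take (i+1-start) := by
          rw [PySem.List.slice_natCast]
        have hslice2 : PySem.List.slice arr (some ((i+1 : Nat) : Int)) (some ((arr.length : Nat) : Int))
            = arr.drop (i+1) := by
          rw [PySem.List.slice_natCast]
          exact List.take_of_length_le (by simp [List.length_drop])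
        rw [hslice1, hslice2]
        have hLne : (arr.drop start).take (i+1-start) ≠ [] := by
          intro hnil
          have := congrArg List.length hnil
          simp [List.length_take, List.length_drop] at this
          omega
        have hDne : arr.drop (i+1) ≠ [] := by
          intro hnil
          have := congrArg List.length hnil
          simp [List.length_drop] at this
          omega
        obtain ⟨lx, lt', hL⟩ := List.exists_cons_of_ne_nil hLne
        obtain ⟨dx, dt, hD⟩ := List.exists_cons_of_ne_nil hDne
        rw [hL, hD, PySem.List.max?_id_cons, PySem.List.min?_id_cons]
        simp only [Option.getD_some]
        have hglobL : lt'.foldl max lx = nmaxD ((arr.drop start).take (i+1-start)) := by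
          rw [hL]; rfl
        have hglobR : dt.foldl min dx = nminD (arr.drop (i+1)) := by
          rw [hD]; rfl
        rw [hglobL, hglobR]
        have hdropdrop : (arr.drop start).drop (i+1-start) = arr.drop (i+1) := by
          rw [List.drop_drop]
          congr 1
          omega
        have hbR : bmin ≤ nminD (arr.drop (i+1)) := by
          rw [hbm]
          apply nminD_le
          have hsub : arr.drop (i+1) ⊆ arr.drop start := by
            intro y hy
            rw [← hdropdrop] at hy
            exact List.mem_of_mem_drop hy
          exact hsub (nminD_mem hDne)
        have htake_split : arr.take (i+1) = arr.take start ++ (arr.drop start).take (i+1-start) := by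
          rw [show i+1 = start + (i+1-start) from by omega, List.take_add,
            Nat.add_sub_cancel_left]
        have htne : arr.take (i+1) ≠ [] := by
          have hlt' : (arr.take (i+1)).length = i+1 := by rw [List.length_take]; omega
          intro hnil
          rw [hnil] at hlt'
          simp at hlt' 
        have hiffG : nmaxD (arr.take (i+1)) < nminD (arr.drop (i+1))
            ↔ nmaxD ((arr.drop start).take (i+1-start)) < nminD (arr.drop (i+1)) := by
          constructor
          · intro hg
            refine lt_of_le_of_lt (le_nmaxD ?_) hg
            rw [htake_split]
            exact List.mem_append_right _ (nmaxD_mem hLne)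
          · intro hl
            rw [htake_split]
            have hm := nmaxD_mem htne
            rw [htake_split] at hm
            rcases List.mem_append.1 hm with h1 | h1
            · exact lt_of_lt_of_le (hlt _ h1) hbR
            · exact lt_of_le_of_lt (le_nmaxD h1) hl
        by_cases hc : nmaxD ((arr.drop start).take (i+1-start)) < nminD (arr.drop (i+1))
        · rw [if_pos hc]
          rw [ihf (i+1) (i+1) (nminD (arr.drop (i+1))) (bn+1) (by omega) le_rfl (by omega) rfl
            (fun x hx => lt_of_le_of_lt (le_nmaxD hx) (hiffG.2 hc))]
          rw [cntFrom_step hi]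
          have hcut : cutAt arr i = true := by
            simp only [cutAt, decide_eq_true_eq]
            exact hiffG.2 hc
          rw [hcut]
          simp only [if_true]
          ring
        · rw [if_neg hc]
          rw [ihf (i+1) start bmin bn (by omega) (by omega) (by omega) hbm hlt]
          rw [cntFrom_step hi]
          have hcut : cutAt arr i = false := by
            simp only [cutAt, decide_eq_false_iff_not, not_lt]
            exact not_lt.1 (fun hg => hc (hiffG.1 hg))
          rw [hcut]
          simp only [Bool.false_eq_true, if_false]
          ring
      · rw [if_neg hi]
        have hf0 : f = 0 := by omega
        subst hf0
        show bn + 1 = bn + cntFrom arr i + 1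
        rw [cntFrom_last hi]; ring

lemma a_char (arr : List Int) (bn : Int) (h : arr ≠ []) :
    get_segments_num arr bn = bn + cntFrom arr 0 + 1 := by
  cases arr with
  | nil => exact absurd rfl h
  | cons a t =>
    show pvALoop (a :: t) (a :: t).length 0 0
        ((PySem.List.min? (a :: t) (fun x => x)).getD 0) bn = _
    rw [PySem.List.min?_id_cons, Option.getD_some]
    exact aloop_eq (a :: t) (a :: t).length 0 0 _ bn (by simp) le_rfl (by simp) rfl (by simp)

-- B side
lemma pvSufMins_cons (x : Int) (rest : List Int) :
    pvSufMins (x :: rest) = nminD (x :: rest) :: pvSufMins rest := by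
  induction rest generalizing x with
  | nil => rfl
  | cons y s ih =>
    rw [nminD_cons (x := x) (rest := y :: s) (by simp)]
    show (match pvSufMins (y :: s) with
          | [] => [x]
          | s' :: t => min x s' :: s' :: t) = _
    rw [ih y]

-- the counting sweep of B, as a function of (seed prefix max, remaining list)
def cnt2 (p : Int) : List Int → Int
  | [] => 0
  | [_] => 0
  | x :: y :: s => (if max p x < nminD (y :: s) then 1 else 0) + cnt2 (max p x) (y :: s)

lemma bloop_eq : ∀ (v : List Int) (p c : Int),
    pvCutLoop c p (v.zip (pvSufMins v.tail)) = c + cnt2 p v := by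
  intro v
  induction v with
  | nil => intro p c; simp [pvCutLoop, cnt2]
  | cons x rest ih =>
    intro p c
    cases rest with
    | nil => simp [pvCutLoop, cnt2, pvSufMins]
    | cons y s =>
      show pvCutLoop c p ((x :: y :: s).zip (pvSufMins (y :: s))) = _
      rw [pvSufMins_cons y s]
      show pvCutLoop (if max p x < nminD (y :: s) then c + 1 else c) (max p x)
            ((y :: s).zip (pvSufMins s)) = _
      have hs : pvSufMins s = pvSufMins ((y :: s).tail) := rfl
      rw [hs, ih (max p x) (if max p x < nminD (y :: s) then c + 1 else c)]
      show _ = c + ((if max p x < nminD (y :: s) then 1 else 0) + cnt2 (max p x) (y :: s))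
      by_cases hc : max p x < nminD (y :: s) <;> simp [hc] <;> ring

lemma cnt2_eq_cntFrom (arr : List Int) :
    ∀ (v : List Int) (i : Nat) (p : Int), v = arr.drop i →
    (∀ x w, v = x :: w → max p x = nmaxD (arr.take (i+1))) →
    cnt2 p v = cntFrom arr i := by
  intro v
  induction v with
  | nil =>
    intro i p hv _
    have hle : arr.length ≤ i := List.drop_eq_nil_iff.1 hv.symm
    rw [cntFrom_last (by omega)]; rfl
  | cons x rest ih =>
    intro i p hv hmax
    cases rest with
    | nil =>
      have hlen : arr.length = i + 1 := by
        have := congrArg List.length hv; simp at this; omega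
      rw [cntFrom_last (by omega)]; rfl
    | cons y w =>
      have hlen : arr.length = i + w.length + 2 := by
        have := congrArg List.length hv; simp at this; omega
      have hi1 : i < arr.length - 1 := by omega
      have hdrop1 : arr.drop (i+1) = y :: w := by
        have h := congrArg (List.drop 1) hv
        simpa [List.drop_drop, Nat.add_comm] using h.symm
      have hx : max p x = nmaxD (arr.take (i+1)) := hmax x (y :: w) rfl
      have htake : arr.take (i+2) = arr.take (i+1) ++ [y] := by
        rw [List.take_succ]
        have : arr[i+1]? = some y := by
          have h0 : (arr.drop (i+1))[0]? = some y := by rw [hdrop1]; rfl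
          rwa [List.getElem?_drop] at h0
        rw [this]; rfl
      have htne : arr.take (i+1) ≠ [] := by
        have hl : (arr.take (i+1)).length = i+1 := by rw [List.length_take]; omega
        intro hnil
        rw [hnil] at hl
        simp at hl
      have hstep : nmaxD (arr.take (i+2)) = max (nmaxD (arr.take (i+1))) y := by
        rw [htake, nmaxD_append htne (by simp)]; rfl
      rw [cntFrom_step hi1]
      show (if max p x < nminD (y :: w) then 1 else 0) + cnt2 (max p x) (y :: w) = _
      rw [ih (i+1) (max p x) hdrop1.symm ?_]
      · simp only [cutAt, hx, hdrop1]
        by_cases hc : nmaxD (arr.take (i+1)) < nminD (y :: w) <;> simp [hc]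
      · intro x' w' hw
        cases hw
        rw [hstep, hx]

lemma b_char (arr : List Int) (bn : Int) (h : arr ≠ []) :
    get_segments_num_alt arr bn = bn + cntFrom arr 0 + 1 := by
  cases arr with
  | nil => exact absurd rfl h
  | cons a t =>
    show bn + pvCutLoop 1 a ((a :: t).zip (pvSufMins (a :: t)).tail) = _
    rw [pvSufMins_cons a t]
    show bn + pvCutLoop 1 a ((a :: t).zip (pvSufMins ((a :: t).tail))) = _
    rw [bloop_eq (a :: t) a 1]
    rw [cnt2_eq_cntFrom (a :: t) (a :: t) 0 a (by simp) ?_]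
    · ring
    · intro x w hw
      cases hw
      show max a a = nmaxD [a]
      simp [nmaxD]

-- ===== VERDICT (by name: the statement is the Claim_ definition above) =====
theorem get_segments_num_spec : Claim_equal_get_segments_num := by
  intro arr bn _ hpre
  unfold Spec_get_segments_num
  rw [a_char arr bn hpre, b_char arr bn hpre]
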